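-- pv_equiv track=rewrite | github.com/sachinnsit06/adventofCode | day14/parabolic_dish-part1.py | sort_string_with_O_and_keep_hash
-- ===== SOURCE A (Python) =====
-- def sort_string_with_O_and_keep_hash(string):
--     sortedList =[]
--     for i in string.split("#"):
--         sortSubString = sorted(i)[::-1]
--         sortedList.append(''.join(sortSubString))
--         sortedList.append("#")
--     rtrString = "".join(sortedList)
--     return rtrString[:len(string)]
-- ===== SOURCE B (Python) =====
-- # Counting sort in a single pass: tally character codes per '#'-separated run,
-- # flush the tally in descending code order at each '#' and at the end.
-- # No sort, no split, no final truncation.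
--
-- def _emit(counts):
--     return ''.join(chr(code) * counts[code] for code in range(127, -1, -1))
--
--
-- def sort_string_with_O_and_keep_hash(string):
--     out = []
--     counts = [0] * 128
--     for ch in string:
--         if ch == '#':
--             out.append(_emit(counts))
--             out.append('#')
--             counts = [0] * 128
--         else:
--             counts[ord(ch)] += 1
--     out.append(_emit(counts))
--     return ''.join(out)
-- ===== Notes on version B (the rewrite author's own statement) =====
-- stated objective: alternative
-- what changed: Replaces split + per-segment comparison sort + rejoin + truncation by a single pass that tallies character counts per run and emits each tally in descending code order at every '#' and at the end, so no sorting, no split and no final slice are performed.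
import Mathlib
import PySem

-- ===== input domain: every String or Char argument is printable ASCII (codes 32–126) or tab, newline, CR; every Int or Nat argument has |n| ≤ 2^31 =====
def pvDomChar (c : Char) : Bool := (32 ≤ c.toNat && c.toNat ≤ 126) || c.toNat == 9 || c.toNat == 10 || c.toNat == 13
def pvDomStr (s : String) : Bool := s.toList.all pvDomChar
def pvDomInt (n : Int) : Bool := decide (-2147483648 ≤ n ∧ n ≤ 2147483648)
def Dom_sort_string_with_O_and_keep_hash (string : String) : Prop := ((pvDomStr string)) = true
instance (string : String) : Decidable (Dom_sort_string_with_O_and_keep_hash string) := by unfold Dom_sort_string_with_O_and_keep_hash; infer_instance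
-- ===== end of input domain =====

-- B replaces split + per-segment comparison sort + rejoin + truncation by one counting pass (alternative algorithm; not claimed faster).

-- ===== PORT A =====
def sort_string_with_O_and_keep_hash (string : String) : String :=
  -- for i in string.split("#"): sortedList.append(''.join(sorted(i)[::-1])); sortedList.append("#")
  -- sorted(i)[::-1] is ported as (PySem.List.sorted i id false).reverse (PySem: s[::-1] is reverse)
  let sortedList : List (List Char) :=
    (PySem.Chars.splitOn string.toList ['#']).foldl
      (fun acc i => (acc ++ [(PySem.List.sorted i (fun c => c) false).reverse]) ++ [['#']]) []
  let rtrString : List Char := PySem.Chars.join [] sortedList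
  String.ofList (PySem.List.slice rtrString none (some (PySem.Str.len string)))

-- ===== PORT B =====
-- counts = [0] * 128
def pvZero : List Int := List.replicate 128 0

-- counts[ord(ch)] += 1  (index always in range here: len(counts) = 128, ord(ch) < 128 on Dom)
def pvBump (counts : List Int) (c : Char) : List Int :=
  counts.set c.toNat (counts.getD c.toNat 0 + 1)

-- ''.join(chr(code) * counts[code] for code in range(127, -1, -1))
def pvEmit (counts : List Int) : List Char :=
  (PySem.List.pyRange 127 (-1) (-1)).foldl
    (fun acc code => acc ++ List.replicate (counts.getD code.toNat 0).toNat (Char.ofNat code.toNat)) []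

-- one iteration of the for-ch loop on the state (out, counts)
def pvStep (st : List (List Char) × List Int) (ch : Char) : List (List Char) × List Int :=
  if ch = '#' then (st.1 ++ [pvEmit st.2] ++ [['#']], pvZero)
  else (st.1, pvBump st.2 ch)

def sort_string_with_O_and_keep_hash_alt (string : String) : String :=
  let st := string.toList.foldl pvStep ([], pvZero)
  String.ofList ((st.1 ++ [pvEmit st.2]).flatten)

-- ===== PRECONDITION & SPEC =====
def Spec_sort_string_with_O_and_keep_hash (string : String) (out : String) : Prop := out = sort_string_with_O_and_keep_hash_alt string
instance (string : String) (out : String) : Decidable (Spec_sort_string_with_O_and_keep_hash string out) := by unfold Spec_sort_string_with_O_and_keep_hash; infer_instance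

-- ===== CLAIM (what is proved, stated in full; the proofs are below) =====
def Claim_equal_sort_string_with_O_and_keep_hash : Prop := ∀ (string : String), Dom_sort_string_with_O_and_keep_hash string → Spec_sort_string_with_O_and_keep_hash string (sort_string_with_O_and_keep_hash string)

-- ===== LEMMAS AND PROOFS =====

-- simple recursion computing string.split("#") for the single-char separator
def pvSplit : List Char → List (List Char)
  | [] => [[]]
  | c :: rest =>
    if c = '#' then [] :: pvSplit rest
    else match pvSplit rest with
      | [] => [[c]]
      | h :: t => (c :: h) :: t

-- what B's pass computes from a given tally onward
def pvSpec (counts : List Int) : List Char → List Char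
  | [] => pvEmit counts
  | c :: rest => if c = '#' then pvEmit counts ++ '#' :: pvSpec pvZero rest
                 else pvSpec (pvBump counts c) rest

-- the common normal form: segments reverse-sorted, joined by '#', no trailing '#'
def pvG : List (List Char) → List Char
  | [] => []
  | [p] => (PySem.List.sorted p (fun c => c) false).reverse
  | p :: q :: t => (PySem.List.sorted p (fun c => c) false).reverse ++ '#' :: pvG (q :: t)

-- the ascending block of one character code: cnt(k) copies of chr(k)
def pvH (pre : List Char) (k : Nat) : List Char :=
  List.replicate (pre.countP (fun c => c.toNat == k)) (Char.ofNat k)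

theorem pvSplit_ne_nil (l : List Char) : pvSplit l ≠ [] := by
  induction l with
  | nil => simp [pvSplit]
  | cons c rest ih =>
    simp only [pvSplit]
    split
    · simp
    · cases hpr : pvSplit rest <;> simp

theorem pvGo (fuel : Nat) : ∀ (l cur : List Char) (acc : List (List Char)), l.length < fuel →
    PySem.Chars.splitOn.go ['#'] fuel l cur acc =
      acc.reverse ++ (cur.reverse ++ (pvSplit l).headI) :: (pvSplit l).tail := by
  induction fuel with
  | zero => intro l cur acc h; exact absurd h (Nat.not_lt_zero _)
  | succ f ih =>
    intro l cur acc h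
    cases l with
    | nil =>
      rw [show PySem.Chars.splitOn.go ['#'] (f+1) [] cur acc = (cur.reverse :: acc).reverse from
        by rw [PySem.Chars.splitOn.go] <;> omega]
      simp [pvSplit]
    | cons c rest =>
      have hlen : rest.length < f := by simp at h; omega
      by_cases hc : c = '#'
      · subst hc
        rw [show PySem.Chars.splitOn.go ['#'] (f+1) ('#'::rest) cur acc
            = PySem.Chars.splitOn.go ['#'] f rest [] (cur.reverse :: acc) from
          by rw [PySem.Chars.splitOn.go]; simp [List.isPrefixOf]]
        rw [ih rest [] (cur.reverse :: acc) hlen]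
        obtain ⟨h1, t1, hp⟩ := List.exists_cons_of_ne_nil (pvSplit_ne_nil rest)
        simp [pvSplit, hp]
      · have hc' : ¬ ('#' = c) := fun hh => hc hh.symm
        rw [show PySem.Chars.splitOn.go ['#'] (f+1) (c::rest) cur acc
            = PySem.Chars.splitOn.go ['#'] f rest (c :: cur) acc from
          by rw [PySem.Chars.splitOn.go]; simp [List.isPrefixOf, hc']]
        rw [ih rest (c :: cur) acc hlen]
        obtain ⟨h1, t1, hp⟩ := List.exists_cons_of_ne_nil (pvSplit_ne_nil rest)
        simp [pvSplit, hc, hp]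

theorem pvSplitOn_eq (l : List Char) : PySem.Chars.splitOn l ['#'] = pvSplit l := by
  show PySem.Chars.splitOn.go ['#'] (l.length + 1) l [] [] = pvSplit l
  rw [pvGo (l.length + 1) l [] [] (by omega)]
  obtain ⟨h, t, hp⟩ := List.exists_cons_of_ne_nil (pvSplit_ne_nil l)
  simp [hp]

theorem pvSplit_len (l : List Char) :
    ((pvSplit l).map List.length).sum + (pvSplit l).length - 1 = l.length := by
  induction l with
  | nil => simp [pvSplit]
  | cons c rest ih =>
    have hne := pvSplit_ne_nil rest
    have hlen : 1 ≤ (pvSplit rest).length := List.length_pos_of_ne_nil hne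
    by_cases hc : c = '#'
    · subst hc
      simp [pvSplit]
      omega
    · obtain ⟨h, t, hp⟩ := List.exists_cons_of_ne_nil hne
      rw [hp] at ih
      simp only [pvSplit, if_neg hc, hp]
      simp only [List.map_cons, List.sum_cons, List.length_cons] at *
      omega

theorem pvJoin_take (parts : List (List Char)) (hne : parts ≠ []) :
    (PySem.Chars.join []
        (parts.flatMap (fun p => [(PySem.List.sorted p (fun c => c) false).reverse, ['#']]))).take
      ((parts.map List.length).sum + parts.length - 1) = pvG parts := by
  induction parts with
  | nil => exact absurd rfl hne
  | cons p ps ih =>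
    have hlAp : ((PySem.List.sorted p (fun c => c) false).reverse).length = p.length := by
      simp [PySem.List.length_sorted]
    cases ps with
    | nil =>
      simp only [List.flatMap_cons, List.flatMap_nil, List.append_nil]
      rw [PySem.Chars.join_cons_cons, PySem.Chars.join_singleton]
      rw [show ([p].map List.length).sum + [p].length - 1
          = ((PySem.List.sorted p (fun c => c) false).reverse).length from by rw [hlAp]; simp]
      simp only [List.append_nil]
      rw [List.take_left]
      simp [pvG]
    | cons q t =>
      set M := ((q :: t).map List.length).sum + (q :: t).length - 1 with hM
      have ihh := ih (by simp)
      have hx : (p :: q :: t).flatMap (fun p => [(PySem.List.sorted p (fun c => c) false).reverse, ['#']])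
          = (PySem.List.sorted p (fun c => c) false).reverse :: ['#'] ::
            (q :: t).flatMap (fun p => [(PySem.List.sorted p (fun c => c) false).reverse, ['#']]) := by
        simp [List.flatMap_cons]
      have hy : (q :: t).flatMap (fun p => [(PySem.List.sorted p (fun c => c) false).reverse, ['#']])
          = (PySem.List.sorted q (fun c => c) false).reverse :: ['#'] ::
            t.flatMap (fun p => [(PySem.List.sorted p (fun c => c) false).reverse, ['#']]) := by
        simp [List.flatMap_cons]
      rw [hx, PySem.Chars.join_cons_cons, hy, PySem.Chars.join_cons_cons, ← hy]
      have hN : ((p :: q :: t).map List.length).sum + (p :: q :: t).length - 1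
          = p.length + (1 + M) := by
        simp only [hM, List.map_cons, List.sum_cons, List.length_cons]
        omega
      rw [hN]
      simp only [List.append_nil, List.singleton_append]
      rw [List.take_append]
      rw [List.take_of_length_le (by rw [hlAp]; omega)]
      rw [show p.length + (1 + M) - ((PySem.List.sorted p (fun c => c) false).reverse).length
          = M + 1 from by rw [hlAp]; omega]
      rw [List.take_succ_cons, ihh]
      simp [pvG]

-- ---- counting-sort core ----

theorem pvCounts_getD (pre : List Char) : ∀ (counts : List Int), counts.length = 128 →
    (∀ c ∈ pre, c.toNat < 128) → ∀ k, k < 128 →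
    (pre.foldl pvBump counts).getD k 0
      = counts.getD k 0 + (pre.countP (fun c => c.toNat == k) : Int) := by
  induction pre with
  | nil => intro counts _ _ k _; simp
  | cons a l ih =>
    intro counts h hp k hk
    have ha : a.toNat < 128 := hp a (by simp)
    have hlen : (pvBump counts a).length = 128 := by simp [pvBump, h]
    rw [List.foldl_cons, ih (pvBump counts a) hlen (fun c hc => hp c (by simp [hc])) k hk]
    have hset : (pvBump counts a).getD k 0
        = (if a.toNat = k then counts.getD k 0 + 1 else counts.getD k 0) := by
      by_cases hik : a.toNat = k
      · subst hik
        simp [pvBump, List.getD_eq_getElem?_getD, List.getElem?_set, h, ha]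
      · simp [pvBump, List.getD_eq_getElem?_getD, List.getElem?_set, hik]
    rw [hset, List.countP_cons]
    by_cases hak : a.toNat = k
    · simp only [hak, if_pos rfl, beq_self_eq_true, if_true]
      push_cast
      ring
    · have hfa : (a.toNat == k) = false := by simp [hak]
      simp [hak, hfa]

theorem pvRevRange (n : Nat) : (List.range n).reverse = (List.range n).map (fun j => n - 1 - j) := by
  induction n with
  | zero => simp
  | succ m ih =>
    conv_rhs => rw [List.range_succ_eq_map]
    rw [List.range_succ, List.reverse_append, ih]
    simp only [List.reverse_cons, List.reverse_nil, List.nil_append, List.singleton_append,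
      List.map_cons, List.map_map]
    refine List.cons_eq_cons.mpr ⟨by simp, ?_⟩
    refine List.map_congr_left fun a _ => ?_
    simp only [Function.comp]
    omega

theorem pvSumSingle (g : Nat → Nat) : ∀ (n j : Nat), j < n → (∀ k, k < n → k ≠ j → g k = 0) →
    ((List.range n).map g).sum = g j := by
  intro n
  induction n with
  | zero => intro j h _; exact absurd h (Nat.not_lt_zero j)
  | succ m ih =>
    intro j hj hz
    rw [List.range_succ, List.map_append, List.sum_append]
    by_cases hjm : j = m
    · subst hjm
      have hz0 : ((List.range j).map g).sum = 0 := by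
        apply List.sum_eq_zero
        intro x hx
        rw [List.mem_map] at hx
        obtain ⟨k, hk, rfl⟩ := hx
        rw [List.mem_range] at hk
        exact hz k (by omega) (by omega)
      simp [hz0]
    · have hjlt : j < m := by omega
      rw [ih j hjlt (fun k hk hkj => hz k (by omega) hkj)]
      have hm0 : g m = 0 := hz m (by omega) (Ne.symm hjm)
      simp [hm0]

theorem pvCharToNat (k : Nat) (h : k < 128) : (Char.ofNat k).toNat = k := by
  rw [Char.toNat_ofNat, if_pos]
  exact Or.inl (by omega)

theorem pvCharLe {a b : Char} (hab : a.toNat ≤ b.toNat) : a ≤ b := by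
  rw [Char.le_def, UInt32.le_iff_toNat_le]
  exact hab

theorem pvCharEq {a b : Char} (hab : a.toNat = b.toNat) : a = b := by
  rw [← Char.ofNat_toNat a, ← Char.ofNat_toNat b, hab]

theorem pvFlatMapCongr {α : Type} (L : List α) : ∀ (f g : α → List Char),
    (∀ x ∈ L, f x = g x) → L.flatMap f = L.flatMap g := by
  induction L with
  | nil => intro f g _; rfl
  | cons a t ih =>
    intro f g hfg
    simp only [List.flatMap_cons]
    rw [hfg a (by simp), ih f g (fun x hx => hfg x (by simp [hx]))]

theorem pvEmit_counts (pre : List Char) (hpre : ∀ c ∈ pre, c.toNat < 128) :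
    pvEmit (pre.foldl pvBump pvZero) = (PySem.List.sorted pre (fun c => c) false).reverse := by
  have hcnt : ∀ k, k < 128 → ((pre.foldl pvBump pvZero).getD k 0)
      = (pre.countP (fun c => c.toNat == k) : Int) := by
    intro k hk
    rw [pvCounts_getD pre pvZero (by simp [pvZero]) hpre k hk]
    have hz : pvZero.getD k 0 = 0 := by
      unfold pvZero
      rw [List.getD_eq_getElem?_getD, List.getElem?_replicate]
      split <;> simp
    rw [hz]
    simp
  -- emit = flatMap of descending-code blocks
  have hpy : PySem.List.pyRange 127 (-1) (-1) = (List.range 128).map (fun k => (127 : Int) - (k : Nat)) := by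
    rw [PySem.List.pyRange_neg_one]
    rw [show ((127 : Int) - (-1)).toNat = 128 from by decide]
  have h1 : pvEmit (pre.foldl pvBump pvZero)
      = (List.range 128).flatMap (fun j => pvH pre (127 - j)) := by
    unfold pvEmit
    rw [hpy, PySem.List.foldl_append_eq_flatMap, List.nil_append, List.flatMap_map]
    apply pvFlatMapCongr
    intro x hx
    rw [List.mem_range] at hx
    rw [show ((127 : Int) - (x : Nat)).toNat = 127 - x from by omega]
    rw [hcnt (127 - x) (by omega)]
    rw [show ((pre.countP (fun c => c.toNat == (127 - x)) : Nat) : Int).toNat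
        = pre.countP (fun c => c.toNat == (127 - x)) from by omega]
    all_goals rfl
  have hrev : (List.range 128).reverse = (List.range 128).map (fun j => 127 - j) := by
    rw [pvRevRange]
  have h2 : (List.range 128).flatMap (fun j => pvH pre (127 - j))
      = ((List.range 128).reverse).flatMap (pvH pre) := by
    rw [hrev, List.flatMap_map]
  have hC1 : (((List.range 128).flatMap (pvH pre))).reverse
      = ((List.range 128).reverse).flatMap (pvH pre) := by
    rw [List.reverse_flatMap]
    apply pvFlatMapCongr
    intro x _
    simp [Function.comp, pvH, List.reverse_replicate]
  -- the ascending flatMap is Python's sorted(pre)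
  have hperm : ((List.range 128).flatMap (pvH pre)).Perm pre := by
    rw [List.perm_iff_count]
    intro a
    rw [List.count_flatMap]
    by_cases ha : a.toNat < 128
    · rw [pvSumSingle (List.count a ∘ pvH pre) 128 a.toNat ha ?_]
      · simp only [Function.comp, pvH]
        rw [List.count_replicate, Char.ofNat_toNat]
        simp only [BEq.rfl, if_true]
        rw [List.count_eq_countP]
        apply List.countP_congr
        intro x _
        simp only [beq_iff_eq]
        exact ⟨fun hh => pvCharEq hh, fun hh => by rw [hh]⟩
      · intro k hk hkj
        simp only [Function.comp, pvH]
        have hne : (Char.ofNat k == a) = false := by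
          simp only [beq_eq_false_iff_ne, ne_eq]
          intro heq
          apply hkj
          rw [← heq] at *
          rw [pvCharToNat k hk]
        rw [List.count_replicate, hne]
        simp
    · rw [List.count_eq_zero.mpr (fun hmem => ha (hpre a hmem))]
      apply List.sum_eq_zero
      intro x hx
      rw [List.mem_map] at hx
      obtain ⟨k, hk, rfl⟩ := hx
      rw [List.mem_range] at hk
      simp only [Function.comp, pvH]
      have hne : (Char.ofNat k == a) = false := by
        simp only [beq_eq_false_iff_ne, ne_eq]
        intro heq
        apply ha
        rw [← heq, pvCharToNat k hk]
        exact hk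
      rw [List.count_replicate, hne]
      simp
  have hpair : ((List.range 128).flatMap (pvH pre)).Pairwise (fun x1 x2 => x1 ≤ x2) := by
    rw [List.flatMap_def, List.pairwise_flatten]
    constructor
    · intro l hl
      rw [List.mem_map] at hl
      obtain ⟨k, _, rfl⟩ := hl
      exact List.pairwise_replicate.mpr (Or.inr le_rfl)
    · rw [List.pairwise_map, List.pairwise_iff_getElem]
      intro i j hi hj hij
      simp only [List.length_range] at hi hj
      simp only [List.getElem_range]
      intro x hx y hy
      simp only [pvH, List.mem_replicate] at hx hy
      rw [hx.2, hy.2]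
      apply pvCharLe
      rw [pvCharToNat i hi, pvCharToNat j hj]
      omega
  have hsorted := PySem.List.sorted_id_eq_of_perm_of_pairwise pre
    ((List.range 128).flatMap (pvH pre)) hperm hpair
  rw [h1, h2, ← hC1, ← hsorted]

-- ---- B's pass in terms of pvSpec, pvSpec in terms of pvG ----

theorem pvFold (l : List Char) : ∀ (out : List (List Char)) (counts : List Int),
    ((l.foldl pvStep (out, counts)).1 ++ [pvEmit (l.foldl pvStep (out, counts)).2]).flatten
      = out.flatten ++ pvSpec counts l := by
  induction l with
  | nil => intro out counts; simp [pvSpec]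
  | cons c rest ih =>
    intro out counts
    rw [List.foldl_cons]
    by_cases hc : c = '#'
    · subst hc
      rw [show pvStep (out, counts) '#' = (out ++ [pvEmit counts] ++ [['#']], pvZero) from
        by simp [pvStep]]
      rw [ih]
      simp [pvSpec]
    · rw [show pvStep (out, counts) c = (out, pvBump counts c) from by simp [pvStep, hc]]
      rw [ih]
      simp [pvSpec, hc]

theorem pvSpec_eq (l : List Char) : ∀ (pre : List Char), (∀ c ∈ l, c.toNat < 128) →
    (∀ c ∈ pre, c.toNat < 128) →
    pvSpec (pre.foldl pvBump pvZero) l = pvG ((pvSplit l).modifyHead (pre ++ ·)) := by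
  induction l with
  | nil =>
    intro pre _ hpre
    simp only [pvSpec, pvSplit, List.modifyHead]
    rw [pvEmit_counts pre hpre]
    simp [pvG]
  | cons c rest ih =>
    intro pre hl hpre
    by_cases hc : c = '#'
    · subst hc
      rw [show pvSpec (pre.foldl pvBump pvZero) ('#'::rest)
          = pvEmit (pre.foldl pvBump pvZero) ++ '#' :: pvSpec pvZero rest from by simp [pvSpec]]
      rw [pvEmit_counts pre hpre]
      have ih0 := ih [] (fun c hcm => hl c (by simp [hcm])) (by simp)
      rw [show pvSpec pvZero rest = pvSpec (List.foldl pvBump pvZero []) rest from rfl, ih0]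
      obtain ⟨h, t, hp⟩ := List.exists_cons_of_ne_nil (pvSplit_ne_nil rest)
      simp [pvSplit, hp, pvG, List.modifyHead]
    · rw [show pvSpec (pre.foldl pvBump pvZero) (c::rest)
          = pvSpec (pvBump (pre.foldl pvBump pvZero) c) rest from by simp [pvSpec, hc]]
      rw [show pvBump (List.foldl pvBump pvZero pre) c
          = List.foldl pvBump pvZero (pre ++ [c]) from (List.foldl_concat pvBump pvZero c pre).symm]
      have hcm : c.toNat < 128 := hl c (by simp)
      rw [ih (pre ++ [c]) (fun x hx => hl x (by simp [hx]))
          (fun x hx => by rcases List.mem_append.mp hx with h' | h'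
                          · exact hpre x h'
                          · simp at h'; rw [h']; exact hcm)]
      obtain ⟨h, t, hp⟩ := List.exists_cons_of_ne_nil (pvSplit_ne_nil rest)
      simp [pvSplit, hc, hp, List.modifyHead, List.append_assoc]

-- ===== VERDICT (by name: the statement is the Claim_ definition above) =====
theorem sort_string_with_O_and_keep_hash_spec : Claim_equal_sort_string_with_O_and_keep_hash := by
  intro s hdom
  unfold Spec_sort_string_with_O_and_keep_hash
  have hdom' : pvDomStr s = true := hdom
  have hchars : ∀ c ∈ s.toList, c.toNat < 128 := by
    intro c hc
    have h2 := List.all_eq_true.mp hdom' c hc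
    simp [pvDomChar] at h2
    omega
  have hB : sort_string_with_O_and_keep_hash_alt s = String.ofList (pvG (pvSplit s.toList)) := by
    show String.ofList (((s.toList.foldl pvStep ([], pvZero)).1
        ++ [pvEmit (s.toList.foldl pvStep ([], pvZero)).2]).flatten) = _
    rw [pvFold]
    rw [show pvSpec pvZero s.toList = pvSpec (List.foldl pvBump pvZero []) s.toList from rfl]
    rw [pvSpec_eq s.toList [] hchars (by simp)]
    obtain ⟨h, t, hp⟩ := List.exists_cons_of_ne_nil (pvSplit_ne_nil s.toList)
    simp [hp]
  have hA : sort_string_with_O_and_keep_hash s = String.ofList (pvG (pvSplit s.toList)) := by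
    show String.ofList (PySem.List.slice
        (PySem.Chars.join [] ((PySem.Chars.splitOn s.toList ['#']).foldl
          (fun acc i => (acc ++ [(PySem.List.sorted i (fun c => c) false).reverse]) ++ [['#']]) []))
        none (some (PySem.Str.len s))) = _
    rw [pvSplitOn_eq]
    rw [show (fun (acc : List (List Char)) (i : List Char) =>
          (acc ++ [(PySem.List.sorted i (fun c => c) false).reverse]) ++ [['#']])
        = (fun (acc : List (List Char)) (i : List Char) =>
          acc ++ [(PySem.List.sorted i (fun c => c) false).reverse, ['#']]) from
      by funext acc i; simp]
    rw [PySem.List.foldl_append_eq_flatMap, List.nil_append]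
    rw [PySem.Str.len_eq, PySem.List.slice_to_natCast]
    rw [show s.toList.length
        = ((pvSplit s.toList).map List.length).sum + (pvSplit s.toList).length - 1 from
      (pvSplit_len s.toList).symm]
    rw [pvJoin_take _ (pvSplit_ne_nil s.toList)]
  rw [hA, hB]
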